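-- pv_equiv track=rewrite | github.com/JayZisch/CompilerProject | gen_stubs.py | class_stubs
-- ===== SOURCE A (Python) =====
-- p1_classes = ['GetTag', 'InjectFrom', 'ProjectTo', 'Let']
--
-- p0_funcs = ['flatten','code','asm']
--
-- p1_funcs = ['explicate']
--
-- args={}
--
-- def class_stubs(classes = p1_classes, funcs=p0_funcs+p1_funcs):
--     stubs=''
--     for c in classes:
--         stubs += 'class %s(Node):\n'%c
--
--         for f in funcs:
--             stubs += "    def %s(self%s):\n        raise Exception('not implemented')\n    \n"%(f, args.get(f,''))
--         stubs += '\n\n'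
--     return stubs
-- ===== SOURCE B (Python) =====
-- p1_classes = ['GetTag', 'InjectFrom', 'ProjectTo', 'Let']
--
-- p0_funcs = ['flatten','code','asm']
--
-- p1_funcs = ['explicate']
--
-- args={}
--
-- def class_stubs(classes = p1_classes, funcs=p0_funcs+p1_funcs):
--     # Build the class-invariant method block once, then emit one block per class.
--     body = ''.join("    def %s(self%s):\n        raise Exception('not implemented')\n    \n" % (f, args.get(f, ''))
--                    for f in funcs)
--     return ''.join('class %s(Node):\n' % c + body + '\n\n' for c in classes)
-- ===== Notes on version B (the rewrite author's own statement) =====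
-- stated objective: simpler
-- what changed: B hoists the class-invariant method block out of the nested loop: it builds the per-function block once with one join over funcs and then emits it per class with a second single join, replacing A's nested accumulator loops with two sequential single passes.
import Mathlib
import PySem

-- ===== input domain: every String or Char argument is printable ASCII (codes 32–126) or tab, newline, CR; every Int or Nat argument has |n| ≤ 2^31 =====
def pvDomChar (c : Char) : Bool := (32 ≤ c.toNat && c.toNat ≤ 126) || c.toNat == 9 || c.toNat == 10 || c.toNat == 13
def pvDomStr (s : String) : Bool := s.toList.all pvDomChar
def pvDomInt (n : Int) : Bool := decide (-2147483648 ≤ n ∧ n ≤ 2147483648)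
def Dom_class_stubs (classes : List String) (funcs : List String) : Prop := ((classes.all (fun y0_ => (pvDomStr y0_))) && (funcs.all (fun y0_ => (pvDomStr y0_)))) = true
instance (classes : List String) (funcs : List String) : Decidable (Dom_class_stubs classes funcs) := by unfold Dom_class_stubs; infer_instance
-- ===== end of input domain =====

-- B builds the class-invariant method block once (one join over funcs) and joins it per class,
-- replacing A's nested accumulator loops with two sequential joins; objective: simpler.

-- ===== PORT A =====
-- module-level `args = {}` (empty dict) used by both versions
def pvArgs : PySem.Dict String String := PySem.Dict.empty

-- one method stub line group: "    def %s(self%s):\n        raise Exception('not implemented')\n    \n" % (f, args.get(f,''))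
def pvMethodStub (f : String) : String :=
  "    def " ++ f ++ "(self" ++ PySem.Dict.getD pvArgs f "" ++ "):\n        raise Exception('not implemented')\n    \n"

def class_stubs (classes : List String) (funcs : List String) : String :=
  classes.foldl (fun stubs c =>
    (funcs.foldl (fun s f => s ++ pvMethodStub f)
      (stubs ++ ("class " ++ c ++ "(Node):\n"))) ++ "\n\n") ""

-- ===== PORT B =====
def class_stubs_alt (classes : List String) (funcs : List String) : String :=
  let body := String.join (funcs.map pvMethodStub)
  String.join (classes.map (fun c => "class " ++ c ++ "(Node):\n" ++ body ++ "\n\n"))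

-- ===== PRECONDITION & SPEC =====
def Spec_class_stubs (classes : List String) (funcs : List String) (out : String) : Prop := out = class_stubs_alt classes funcs
instance (classes : List String) (funcs : List String) (out : String) : Decidable (Spec_class_stubs classes funcs out) := by unfold Spec_class_stubs; infer_instance

-- ===== CLAIM (what is proved, stated in full; the proofs are below) =====
def Claim_equal_class_stubs : Prop := ∀ (classes : List String) (funcs : List String), Dom_class_stubs classes funcs → Spec_class_stubs classes funcs (class_stubs classes funcs)

-- ===== LEMMAS AND PROOFS =====

theorem foldl_str_acc : ∀ (l : List String) (s t : String),
    List.foldl (· ++ ·) (s ++ t) l = s ++ List.foldl (· ++ ·) t l := by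
  intro l
  induction l with
  | nil => intro s t; rfl
  | cons x xs ih =>
    intro s t
    simp only [List.foldl_cons]
    rw [String.append_assoc]
    exact ih s (t ++ x)

theorem join_cons (a : String) (l : List String) : String.join (a :: l) = a ++ String.join l := by
  simp only [String.join, List.foldl_cons]
  rw [show ("" : String) ++ a = a ++ "" by simp]
  exact foldl_str_acc l a ""

-- a left fold that appends g x each step equals the accumulator followed by the joined map
theorem foldl_hoist {α : Type} (g : α → String) :
    ∀ (xs : List α) (s : String), xs.foldl (fun a x => a ++ g x) s = s ++ String.join (xs.map g) := by
  intro xs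
  induction xs with
  | nil => intro s; simp [String.join]
  | cons x xs ih =>
    intro s
    rw [List.foldl_cons, ih, List.map_cons, join_cons, String.append_assoc]

theorem class_stubs_eq_alt (classes funcs : List String) :
    class_stubs classes funcs = class_stubs_alt classes funcs := by
  unfold class_stubs class_stubs_alt
  have hstep : (fun (stubs c : String) =>
        (funcs.foldl (fun s f => s ++ pvMethodStub f) (stubs ++ ("class " ++ c ++ "(Node):\n"))) ++ "\n\n")
      = fun stubs c => stubs ++ ("class " ++ c ++ "(Node):\n" ++ String.join (funcs.map pvMethodStub) ++ "\n\n") := by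
    funext stubs c
    rw [foldl_hoist]
    simp [String.append_assoc]
  rw [hstep, foldl_hoist]
  simp

-- ===== VERDICT (by name: the statement is the Claim_ definition above) =====
theorem class_stubs_spec : Claim_equal_class_stubs := by
  intro classes funcs _
  unfold Spec_class_stubs
  exact class_stubs_eq_alt classes funcs
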